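-- pv_equiv track=rewrite | github.com/andrewsohrabi/simple-agent-public | src/agent/memory.py | _ordered_fact_keys
-- ===== SOURCE A (Python) =====
-- from typing import Any
--
-- def _ordered_fact_keys(category: str, items: dict[str, Any]) -> list[str]:
--     keys = sorted(items)
--     if category != "profile":
--         return keys
--
--     preferred = ("name", "department", "role", "domain")
--     ordered = [key for key in preferred if key in items]
--     ordered.extend(key for key in keys if key not in preferred)
--     return ordered
-- ===== SOURCE B (Python) =====
-- def _ordered_fact_keys(category, items):
--     if category != "profile":
--         return sorted(items)
--     preferred = ("name", "department", "role", "domain")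
--     def rank(k):
--         return preferred.index(k) if k in preferred else len(preferred)
--     return sorted(items, key=lambda k: (rank(k), k))
-- ===== Notes on version B (the rewrite author's own statement) =====
-- stated objective: simpler
-- what changed: The profile branch's two-list partition (preferred-filter list extended with the non-preferred tail of the sorted keys) is replaced by a single sorted() call with a composite (rank, key) key, where rank is the position in the preferred tuple or its length.
import Mathlib
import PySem

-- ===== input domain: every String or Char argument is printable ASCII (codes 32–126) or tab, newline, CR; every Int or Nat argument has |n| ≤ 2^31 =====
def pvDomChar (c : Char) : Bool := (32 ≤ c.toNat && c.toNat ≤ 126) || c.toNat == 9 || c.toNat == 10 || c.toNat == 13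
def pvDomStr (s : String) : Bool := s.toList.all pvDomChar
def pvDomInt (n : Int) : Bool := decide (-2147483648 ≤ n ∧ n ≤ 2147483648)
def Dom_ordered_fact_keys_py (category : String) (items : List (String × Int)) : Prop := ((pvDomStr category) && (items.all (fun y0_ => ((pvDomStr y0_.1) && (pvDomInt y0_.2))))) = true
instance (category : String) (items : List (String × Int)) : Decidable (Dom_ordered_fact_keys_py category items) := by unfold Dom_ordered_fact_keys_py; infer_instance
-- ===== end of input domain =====

-- B replaces A's two-list build (preferred-filter then extend with the rest of sorted(items))
-- by ONE sorted(items, key=(rank, k)) call with a composite key; objective: simpler.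

-- ===== PORT A =====
-- The dict argument arrives as an association list; the dict's keys are its first
-- components deduplicated in insertion order (PySem.List.dedup).
def ordered_fact_keys_py (category : String) (items : List (String × Int)) : List String :=
  let ik := PySem.List.dedup (items.map (·.1))        -- the dict's key list
  let keys := PySem.List.sorted ik (fun k => k) false -- keys = sorted(items)
  if category ≠ "profile" then keys
  else
    let preferred : List String := ["name", "department", "role", "domain"]
    let ordered := preferred.filter (fun key => ik.contains key)          -- [key for key in preferred if key in items]
    ordered ++ keys.filter (fun key => !preferred.contains key)           -- ordered.extend(key for key in keys if key not in preferred)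

-- ===== PORT B =====
-- rank(k) = preferred.index(k) if k in preferred else len(preferred)
def pyRank_ofk (k : String) : Int :=
  let preferred : List String := ["name", "department", "role", "domain"]
  if preferred.contains k then ((PySem.List.index? preferred k).getD 0 : Nat) else (preferred.length : Int)

def ordered_fact_keys_py_alt (category : String) (items : List (String × Int)) : List String :=
  let ik := PySem.List.dedup (items.map (·.1))        -- the dict's key list
  if category ≠ "profile" then PySem.List.sorted ik (fun k => k) false
  else PySem.List.sorted2 ik pyRank_ofk (fun k => k) false

-- ===== PRECONDITION & SPEC =====
def Spec_ordered_fact_keys_py (category : String) (items : List (String × Int)) (out : List String) : Prop := out = ordered_fact_keys_py_alt category items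
instance (category : String) (items : List (String × Int)) (out : List String) : Decidable (Spec_ordered_fact_keys_py category items out) := by unfold Spec_ordered_fact_keys_py; infer_instance

-- ===== CLAIM (what is proved, stated in full; the proofs are below) =====
def Claim_equal_ordered_fact_keys_py : Prop := ∀ (category : String) (items : List (String × Int)), Dom_ordered_fact_keys_py category items → Spec_ordered_fact_keys_py category items (ordered_fact_keys_py category items)

-- ===== LEMMAS AND PROOFS =====

-- The lexicographic (rank, key) order both programs realise.
def lexR (a b : String) : Prop := pyRank_ofk a < pyRank_ofk b ∨ (pyRank_ofk a = pyRank_ofk b ∧ a ≤ b)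

theorem lexR_trans {a b c : String} (h1 : lexR a b) (h2 : lexR b c) : lexR a c := by
  unfold lexR at *
  rcases h1 with h1 | ⟨e1, l1⟩ <;> rcases h2 with h2 | ⟨e2, l2⟩
  · exact Or.inl (lt_trans h1 h2)
  · exact Or.inl (e2 ▸ h1)
  · exact Or.inl (e1 ▸ h2)
  · exact Or.inr ⟨e1.trans e2, le_trans l1 l2⟩

-- sorted2's comparator implies lexR, and its negation implies the reverse lexR.
theorem lexR_of_cmp {a b : String}
    (h : (decide (pyRank_ofk a < pyRank_ofk b) || (!decide (pyRank_ofk b < pyRank_ofk a) && decide (a < b))) = true) :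
    lexR a b := by
  simp only [Bool.or_eq_true, Bool.and_eq_true, Bool.not_eq_true', decide_eq_true_eq,
    decide_eq_false_iff_not] at h
  rcases h with h | ⟨h1, h2⟩
  · exact Or.inl h
  · by_cases hab : pyRank_ofk a < pyRank_ofk b
    · exact Or.inl hab
    · exact Or.inr ⟨by omega, le_of_lt h2⟩

theorem lexR_of_not_cmp {a b : String}
    (h : ¬ (decide (pyRank_ofk a < pyRank_ofk b) || (!decide (pyRank_ofk b < pyRank_ofk a) && decide (a < b))) = true) :
    lexR b a := by
  simp only [Bool.or_eq_true, Bool.and_eq_true, Bool.not_eq_true', decide_eq_true_eq,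
    decide_eq_false_iff_not, not_or, not_and] at h
  obtain ⟨h1, h2⟩ := h
  by_cases hba : pyRank_ofk b < pyRank_ofk a
  · exact Or.inl hba
  · have heq : pyRank_ofk a = pyRank_ofk b := le_antisymm (le_of_not_gt hba) (le_of_not_gt h1)
    have := h2 (by simp [hba])
    exact Or.inr ⟨heq.symm, le_of_not_gt (by simpa using this)⟩

-- insertBy with sorted2's comparator preserves Pairwise lexR.
theorem insertBy_pairwise_lexR (x : String) (ys : List String)
    (hp : ys.Pairwise lexR) :
    (PySem.List.insertBy (fun a b => decide (pyRank_ofk a < pyRank_ofk b) || (!decide (pyRank_ofk b < pyRank_ofk a) && decide (a < b))) x ys).Pairwise lexR := by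
  induction ys with
  | nil => simp [PySem.List.insertBy]
  | cons y ys ih =>
    rw [PySem.List.insertBy]
    split
    · rename_i hlt
      have hxy : lexR x y := lexR_of_cmp hlt
      refine List.Pairwise.cons ?_ hp
      intro z hz
      rcases hz with _ | hz
      · exact hxy
      · exact lexR_trans hxy (List.rel_of_pairwise_cons hp (by assumption))
    · rename_i hnlt
      have hyx : lexR y x := lexR_of_not_cmp hnlt
      have hp' := List.pairwise_cons.mp hp
      refine List.pairwise_cons.mpr ⟨?_, ih hp'.2⟩
      intro z hz
      rcases (PySem.List.mem_insertBy _ _ _ _).mp hz with rfl | hz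
      · exact hyx
      · exact hp'.1 z hz

theorem foldl_insertBy_pairwise_lexR (xs acc : List String)
    (hp : acc.Pairwise lexR) :
    (xs.foldl (fun acc x => PySem.List.insertBy (fun a b => decide (pyRank_ofk a < pyRank_ofk b) || (!decide (pyRank_ofk b < pyRank_ofk a) && decide (a < b))) x acc) acc).Pairwise lexR := by
  induction xs generalizing acc with
  | nil => exact hp
  | cons x xs ih => exact ih _ (insertBy_pairwise_lexR x acc hp)

theorem sorted2_pairwise_lexR (xs : List String) :
    (PySem.List.sorted2 xs pyRank_ofk (fun k => k) false).Pairwise lexR := by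
  simpa [PySem.List.sorted2] using foldl_insertBy_pairwise_lexR xs [] List.Pairwise.nil

-- rank facts
theorem pyRank_of_not_pref {k : String}
    (h : (["name", "department", "role", "domain"] : List String).contains k = false) :
    pyRank_ofk k = 4 := by
  unfold pyRank_ofk
  simp only [h]
  rfl

theorem pyRank_lt_four_of_pref {k : String}
    (h : k ∈ (["name", "department", "role", "domain"] : List String)) :
    pyRank_ofk k < 4 := by
  fin_cases h <;> decide

-- A's profile-branch output is Pairwise lexR.
theorem pref_pairwise (p : String → Bool) :
    ((["name", "department", "role", "domain"] : List String).filter p).Pairwise lexR := by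
  have h : (["name", "department", "role", "domain"] : List String).Pairwise lexR := by
    unfold lexR; decide
  exact h.filter p

theorem a_profile_pairwise (ik : List String) :
    ((["name", "department", "role", "domain"] : List String).filter (fun key => ik.contains key)
      ++ (PySem.List.sorted ik (fun k => k) false).filter (fun key => !(["name", "department", "role", "domain"] : List String).contains key)).Pairwise lexR := by
  rw [List.pairwise_append]
  refine ⟨pref_pairwise _, ?_, ?_⟩
  · -- the rest: all rank 4, alphabetically nondecreasing
    have hs : (PySem.List.sorted ik (fun k => k) false).Pairwise (fun a b => a ≤ b) :=
      PySem.List.sorted_pairwise ik (fun k => k)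
    have := hs.filter (fun key => !(["name", "department", "role", "domain"] : List String).contains key)
    refine this.imp_of_mem ?_
    intro a b ha hb hle
    have ha4 : pyRank_ofk a = 4 := pyRank_of_not_pref (by
      have := List.of_mem_filter ha; simpa using this)
    have hb4 : pyRank_ofk b = 4 := pyRank_of_not_pref (by
      have := List.of_mem_filter hb; simpa using this)
    exact Or.inr ⟨ha4.trans hb4.symm, hle⟩
  · -- across: preferred ranks < 4 ≤ rest rank
    intro a ha b hb
    have ha' : a ∈ (["name", "department", "role", "domain"] : List String) := List.mem_of_mem_filter ha
    have hb4 : pyRank_ofk b = 4 := pyRank_of_not_pref (by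
      have := List.of_mem_filter hb; simpa using this)
    exact Or.inl (by rw [hb4]; exact pyRank_lt_four_of_pref ha')

-- A's profile-branch output is a permutation of ik (ik has no duplicates).
theorem a_profile_perm (ik : List String) (hnd : ik.Nodup) :
    ((["name", "department", "role", "domain"] : List String).filter (fun key => ik.contains key)
      ++ (PySem.List.sorted ik (fun k => k) false).filter (fun key => !(["name", "department", "role", "domain"] : List String).contains key)).Perm ik := by
  have hsp : (PySem.List.sorted ik (fun k => k) false).Perm ik := PySem.List.sorted_perm ik _ _
  have hsnd : (PySem.List.sorted ik (fun k => k) false).Nodup := hsp.nodup_iff.mpr hnd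
  rw [List.perm_ext_iff_of_nodup ?_ hnd]
  · intro x
    simp only [List.mem_append, List.mem_filter, List.contains_iff_mem, Bool.not_eq_eq_eq_not,
      Bool.not_true, hsp.mem_iff]
    constructor
    · rintro (⟨_, hx⟩ | ⟨hx, _⟩) <;> simpa using hx
    · intro hx
      by_cases hp : x ∈ (["name", "department", "role", "domain"] : List String)
      · exact Or.inl ⟨hp, by simpa using hx⟩
      · exact Or.inr ⟨by simpa using hx, by simpa using hp⟩
  · rw [List.nodup_append]
    refine ⟨List.Nodup.filter _ (by decide), List.Nodup.filter _ hsnd, ?_⟩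
    intro x hx y hy hxy
    subst hxy
    have h1 := (List.mem_filter.mp hx).1
    have h2 := (List.mem_filter.mp hy).2
    rw [Bool.not_eq_eq_eq_not, Bool.not_true, List.contains_eq_mem, decide_eq_false_iff_not] at h2
    exact h2 (by simpa using h1)

-- Two Pairwise-lexR permutations of each other are equal (lexR is antisymmetric).
theorem eq_of_perm_pairwise_lexR {l₁ l₂ : List String}
    (hperm : l₁.Perm l₂) (h1 : l₁.Pairwise lexR) (h2 : l₂.Pairwise lexR) : l₁ = l₂ := by
  refine List.Perm.eq_of_pairwise ?_ h1 h2 hperm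
  intro a b _ _ hab hba
  rcases hab with h | ⟨_, hle⟩ <;> rcases hba with h' | ⟨_, hle'⟩
  · exact absurd h' (lt_asymm h)
  · exact absurd h (by omega)
  · exact absurd h' (by omega)
  · exact le_antisymm hle hle'

-- ===== VERDICT (by name: the statement is the Claim_ definition above) =====
theorem ordered_fact_keys_py_spec : Claim_equal_ordered_fact_keys_py := by
  unfold Claim_equal_ordered_fact_keys_py Spec_ordered_fact_keys_py
  intro category items _
  unfold ordered_fact_keys_py ordered_fact_keys_py_alt
  by_cases hc : category ≠ "profile"
  · rw [if_pos hc, if_pos hc]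
  · rw [if_neg hc, if_neg hc]
    set ik := PySem.List.dedup (items.map (·.1)) with hik
    have hnd : ik.Nodup := by
      rw [hik, PySem.List.dedup_eq_ofList]; exact PySem.Set.nodup_ofList _
    have hperm2 : (PySem.List.sorted2 ik pyRank_ofk (fun k => k) false).Perm ik :=
      PySem.List.sorted2_perm ik _ _ _
    exact eq_of_perm_pairwise_lexR
      ((a_profile_perm ik hnd).trans hperm2.symm)
      (a_profile_pairwise ik)
      (sorted2_pairwise_lexR ik)
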